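-- pv_equiv track=rewrite | github.com/selfreferencing/erdos-ternary-digits | deep_mechanism_analysis.py | get_2_contexts
-- ===== SOURCE A (Python) =====
-- def to_base3(n):
--     if n == 0:
--         return [0]
--     digits = []
--     while n > 0:
--         digits.append(n % 3)
--         n //= 3
--     return digits
--
-- def get_2_contexts(n):
--     """Get the context (d[i-1], 2, d[i+1]) for each digit 2."""
--     digits = to_base3(n)
--     contexts = []
--     for i, d in enumerate(digits):
--         if d == 2:
--             prev = digits[i-1] if i > 0 else 0
--             next_ = digits[i+1] if i+1 < len(digits) else 0
--             contexts.append((prev, 2, next_, i))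
--     return contexts
-- ===== SOURCE B (Python) =====
-- def get_2_contexts(n):
--     """Get the context (d[i-1], 2, d[i+1]) for each digit 2."""
--     contexts = []
--     prev = 0
--     i = 0
--     while n > 0:
--         cur = n % 3
--         n //= 3
--         if cur == 2:
--             contexts.append((prev, 2, n % 3, i))
--         prev = cur
--         i += 1
--     return contexts
-- ===== Notes on version B (the rewrite author's own statement) =====
-- stated objective: simpler
-- what changed: Fuses the base-3 conversion and the context scan into one digit-peeling loop that keeps only a previous-digit window, never materialising the digits list or doing indexed lookups.
import Mathlib
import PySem

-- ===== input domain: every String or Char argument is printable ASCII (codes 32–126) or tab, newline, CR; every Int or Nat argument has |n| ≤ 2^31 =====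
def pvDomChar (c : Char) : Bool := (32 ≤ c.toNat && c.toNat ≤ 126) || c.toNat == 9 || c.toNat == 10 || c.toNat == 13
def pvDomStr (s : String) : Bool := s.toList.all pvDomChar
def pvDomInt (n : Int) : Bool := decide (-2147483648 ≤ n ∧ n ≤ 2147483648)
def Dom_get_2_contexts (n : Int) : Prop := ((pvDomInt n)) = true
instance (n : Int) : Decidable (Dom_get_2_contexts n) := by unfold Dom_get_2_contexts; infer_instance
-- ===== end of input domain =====

-- B fuses the base-3 conversion and the context scan into one digit-peeling loop with a
-- one-digit window (objective: simpler — no intermediate digits list, no indexed lookups).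

-- ===== PORT A =====
-- 'while n > 0: digits.append(n % 3); n //= 3'
def to_base3_loop (n : Int) : List Int :=
  if _h : 0 < n then
    PySem.Int.mod n 3 :: to_base3_loop (PySem.Int.floordiv n 3)
  else []
termination_by n.toNat
decreasing_by
  rw [PySem.Int.floordiv_eq_ediv_of_pos (by norm_num)]
  omega

def to_base3 (n : Int) : List Int :=
  if n = 0 then [0] else to_base3_loop n

-- digits[i-1] / digits[i+1] are guarded in range by the branch conditions, so the
-- `.getD 0` fallback of pyGet? is never taken (exact on all reachable indices).
def get_2_contexts (n : Int) : List (Int × Int × Int × Int) :=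
  let digits := to_base3 n
  (PySem.List.enumerate digits 0).foldl (fun acc p =>
    if p.2 = 2 then
      let prev := if p.1 > 0 then (PySem.List.pyGet? digits (p.1 - 1)).getD 0 else 0
      let next_ := if p.1 + 1 < (digits.length : Int) then (PySem.List.pyGet? digits (p.1 + 1)).getD 0 else 0
      acc ++ [(prev, 2, next_, p.1)]
    else acc) []

-- ===== PORT B =====
-- the fused 'while n > 0' loop of Source B, carrying (prev, i, contexts)
def alt_loop (n prev i : Int) (acc : List (Int × Int × Int × Int)) : List (Int × Int × Int × Int) :=
  if h : 0 < n then
    let cur := PySem.Int.mod n 3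
    let n' := PySem.Int.floordiv n 3
    alt_loop n' cur (i + 1) (if cur = 2 then acc ++ [(prev, 2, PySem.Int.mod n' 3, i)] else acc)
  else acc
termination_by n.toNat
decreasing_by
  rw [PySem.Int.floordiv_eq_ediv_of_pos (by norm_num)]
  omega

def get_2_contexts_alt (n : Int) : List (Int × Int × Int × Int) :=
  alt_loop n 0 0 []

-- ===== PRECONDITION & SPEC =====
def Spec_get_2_contexts (n : Int) (out : List (Int × Int × Int × Int)) : Prop := out = get_2_contexts_alt n
instance (n : Int) (out : List (Int × Int × Int × Int)) : Decidable (Spec_get_2_contexts n out) := by unfold Spec_get_2_contexts; infer_instance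

-- ===== CLAIM (what is proved, stated in full; the proofs are below) =====
def Claim_equal_get_2_contexts : Prop := ∀ (n : Int), Dom_get_2_contexts n → Spec_get_2_contexts n (get_2_contexts n)

-- ===== LEMMAS AND PROOFS =====

-- abstract context list: ctx prev i ds = contexts of ds starting at index i with previous digit prev
def ctx (prev i : Int) : List Int → List (Int × Int × Int × Int)
  | [] => []
  | d :: rest => (if d = 2 then [(prev, 2, rest.headD 0, i)] else []) ++ ctx d (i + 1) rest

theorem to_base3_loop_eq (n : Int) :
    to_base3_loop n =
      if 0 < n then PySem.Int.mod n 3 :: to_base3_loop (PySem.Int.floordiv n 3) else [] := by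
  rw [to_base3_loop]; split <;> rfl

theorem alt_loop_eq (n prev i : Int) (acc : List (Int × Int × Int × Int)) :
    alt_loop n prev i acc =
      if 0 < n then
        alt_loop (PySem.Int.floordiv n 3) (PySem.Int.mod n 3) (i + 1)
          (if PySem.Int.mod n 3 = 2 then acc ++ [(prev, 2, PySem.Int.mod (PySem.Int.floordiv n 3) 3, i)] else acc)
      else acc := by
  rw [alt_loop]; split <;> rfl

theorem alt_loop_ctx (m : Nat) : ∀ (n prev i : Int) (acc : List (Int × Int × Int × Int)),
    n.toNat ≤ m → alt_loop n prev i acc = acc ++ ctx prev i (to_base3_loop n) := by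
  induction m with
  | zero =>
    intro n prev i acc hn
    rw [alt_loop_eq, to_base3_loop_eq]
    have : ¬ 0 < n := by omega
    simp [this, ctx]
  | succ m ih =>
    intro n prev i acc hn
    rw [alt_loop_eq, to_base3_loop_eq]
    by_cases h : 0 < n
    · simp only [h, if_true]
      have hdiv : PySem.Int.floordiv n 3 = n / 3 :=
        PySem.Int.floordiv_eq_ediv_of_pos (by norm_num)
      have hle : (PySem.Int.floordiv n 3).toNat ≤ m := by rw [hdiv]; omega
      rw [ih _ _ _ _ hle]
      -- head of the remaining digit list equals (n / 3) % 3 (0 when n / 3 = 0)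
      have hhead : (to_base3_loop (PySem.Int.floordiv n 3)).headD 0
          = PySem.Int.mod (PySem.Int.floordiv n 3) 3 := by
        by_cases h3 : 0 < PySem.Int.floordiv n 3
        · rw [to_base3_loop_eq, if_pos h3, List.headD_cons]
        · have hz : PySem.Int.floordiv n 3 = 0 := by rw [hdiv] at h3 ⊢; omega
          rw [hz, to_base3_loop_eq, if_neg (by omega)]
          simp [PySem.Int.mod]
      rw [ctx, hhead]
      split_ifs <;> simp
    · simp [h, ctx]

-- A's fold over enumerate equals ctx, generalised over a suffix starting at index k.
theorem foldA_ctx (digits : List Int) (ds : List Int) :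
    ∀ (k : Nat) (acc : List (Int × Int × Int × Int)),
    digits.drop k = ds →
    (PySem.List.enumerate ds (k : Int)).foldl (fun acc p =>
      if p.2 = 2 then
        let prev := if p.1 > 0 then (PySem.List.pyGet? digits (p.1 - 1)).getD 0 else 0
        let next_ := if p.1 + 1 < (digits.length : Int) then (PySem.List.pyGet? digits (p.1 + 1)).getD 0 else 0
        acc ++ [(prev, 2, next_, p.1)]
      else acc) acc
    = acc ++ ctx (if 0 < k then (digits[k-1]?).getD 0 else 0) (k : Int) ds := by
  induction ds with
  | nil => intro k acc h; simp [PySem.List.enumerate, ctx]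
  | cons d rest ih =>
    intro k acc hdrop
    have hk : k < digits.length := by
      by_contra hk
      rw [List.drop_eq_nil_of_le (by omega)] at hdrop
      exact List.cons_ne_nil _ _ hdrop.symm
    have hgetk : digits[k]? = some d := by
      have := congrArg List.head? hdrop
      rwa [List.head?_drop] at this
    have hdrop' : digits.drop (k + 1) = rest := by
      have := congrArg List.tail hdrop
      rwa [List.tail_drop] at this
    rw [PySem.List.enumerate_cons, List.foldl_cons]
    have hcast : (k : Int) + 1 = ((k + 1 : Nat) : Int) := by push_cast; ring
    rw [hcast, ih (k + 1) _ hdrop']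
    -- simplify the carried prev of the recursive call
    have hprev' : (if 0 < k + 1 then (digits[k+1-1]?).getD 0 else 0) = d := by
      simp [hgetk]
    rw [hprev']
    -- next lookup at index k equals rest.headD 0
    have hnext : (if ((k + 1 : Nat) : Int) < (digits.length : Int) then (PySem.List.pyGet? digits ((k + 1 : Nat) : Int)).getD 0 else 0)
        = rest.headD 0 := by
      by_cases hlt : k + 1 < digits.length
      · have : (((k + 1 : Nat) : Int) < (digits.length : Int)) := by exact_mod_cast hlt
        rw [if_pos this, PySem.List.pyGet?_natCast]
        have : digits[k+1]? = rest.head? := by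
          rw [← hdrop', List.head?_drop]
        rw [this]
        cases rest <;> simp
      · have hge : digits.length ≤ k + 1 := by omega
        have hnil : rest = [] := by
          rw [← hdrop', List.drop_eq_nil_of_le hge]
        rw [if_neg (by exact_mod_cast hlt), hnil]
        simp
    -- prev lookup at index k matches the ctx argument
    have hprev : (if (k : Int) > 0 then (PySem.List.pyGet? digits ((k : Int) - 1)).getD 0 else 0)
        = (if 0 < k then (digits[k-1]?).getD 0 else 0) := by
      by_cases hk0 : 0 < k
      · have h1 : ((k : Int) > 0) := by exact_mod_cast hk0
        have h2 : (k : Int) - 1 = ((k - 1 : Nat) : Int) := by omega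
        rw [if_pos h1, if_pos hk0, h2, PySem.List.pyGet?_natCast]
      · have hneg : ¬ ((k : Int) > 0) := by omega
        simp [hneg, hk0]
    rw [ctx, hcast]
    simp only [hprev, hnext]
    split_ifs <;> simp

-- ===== VERDICT (by name: the statement is the Claim_ definition above) =====
theorem get_2_contexts_spec : Claim_equal_get_2_contexts := by
  intro n _
  unfold Spec_get_2_contexts get_2_contexts get_2_contexts_alt to_base3
  rw [alt_loop_ctx n.toNat n 0 0 [] le_rfl, List.nil_append]
  by_cases h0 : n = 0
  · subst h0
    have hz : to_base3_loop 0 = [] := by rw [to_base3_loop_eq]; simp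
    simp [hz, PySem.List.enumerate, ctx]
  · simp only [h0, if_false]
    have := foldA_ctx (to_base3_loop n) (to_base3_loop n) 0 [] (by simp)
    simpa using this
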